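-- pv_equiv track=rewrite | github.com/vermutsk/Laborator | NE_metodi/crypt_lab_17.py | all_num_in_fi
-- ===== SOURCE A (Python) =====
-- def all_num_in_fi(num: int):
--     simple_list = []
--     for i in range(2, num):
--         if num % i != 0:
--             simple_list.append(i)
--         else:
--             continue
--     return simple_list
-- ===== SOURCE B (Python) =====
-- def all_num_in_fi(num: int):
--     # Build the set of proper divisors (>=2) of num by O(sqrt(num)) trial
--     # division, then emit the range filtered by set membership.
--     if num < 3:
--         return []
--     divs = set()
--     i = 2
--     while i * i <= num:
--         if num % i == 0:
--             divs.add(i)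
--             divs.add(num // i)
--         i += 1
--     return [j for j in range(2, num) if j not in divs]
-- ===== Notes on version B (the rewrite author's own statement) =====
-- stated objective: alternative
-- what changed: Instead of a modulo test per element of range(2,num), B first computes the divisor set of num by trial division up to sqrt(num) (adding i and num//i), then filters the range by set membership.
import Mathlib
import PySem

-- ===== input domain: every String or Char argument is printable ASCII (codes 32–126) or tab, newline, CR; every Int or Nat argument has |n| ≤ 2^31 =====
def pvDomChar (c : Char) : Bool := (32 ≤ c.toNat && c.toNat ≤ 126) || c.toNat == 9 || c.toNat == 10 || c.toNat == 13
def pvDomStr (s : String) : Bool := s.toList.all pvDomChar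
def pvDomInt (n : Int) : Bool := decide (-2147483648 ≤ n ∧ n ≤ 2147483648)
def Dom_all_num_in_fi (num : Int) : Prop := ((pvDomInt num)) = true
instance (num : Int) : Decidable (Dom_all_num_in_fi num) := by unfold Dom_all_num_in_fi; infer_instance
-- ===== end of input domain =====

-- B replaces the per-element modulo test with a sqrt(num) trial-division pass that builds
-- the divisor set, then filters the range by set membership (alternative algorithm).


-- ===== PORT A =====
def all_num_in_fi (num : Int) : List Int :=
  (PySem.List.pyRange 2 num 1).foldl
    (fun simple_list i =>
      if PySem.Int.mod num i ≠ 0 then simple_list ++ [i] else simple_list) []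

-- ===== PORT B =====
-- while i*i <= num: if num % i == 0: divs.add(i); divs.add(num//i); i += 1
def pvDivLoop (num i : Int) (s : PySem.Set Int) : PySem.Set Int :=
  if h : i * i ≤ num then
    pvDivLoop num (i + 1)
      (if PySem.Int.mod num i = 0 then
        PySem.Set.add (PySem.Set.add s i) (PySem.Int.floordiv num i)
      else s)
  else s
termination_by (num + 1 - i).toNat
decreasing_by
  have hi : i ≤ num := by nlinarith [sq_nonneg i]
  omega

def all_num_in_fi_alt (num : Int) : List Int :=
  if num < 3 then []
  else
    (PySem.List.pyRange 2 num 1).filter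
      (fun j => !(PySem.Set.contains (pvDivLoop num 2 PySem.Set.empty) j))

-- ===== PRECONDITION & SPEC =====
def Spec_all_num_in_fi (num : Int) (out : List Int) : Prop := out = all_num_in_fi_alt num
instance (num : Int) (out : List Int) : Decidable (Spec_all_num_in_fi num out) := by unfold Spec_all_num_in_fi; infer_instance

-- ===== CLAIM (what is proved, stated in full; the proofs are below) =====
def Claim_equal_all_num_in_fi : Prop := ∀ (num : Int), Dom_all_num_in_fi num → Spec_all_num_in_fi num (all_num_in_fi num)

-- ===== LEMMAS AND PROOFS =====

lemma mem_pvDivLoop (num i : Int) (s : PySem.Set Int) (d : Int) (hi : 0 ≤ i) :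
    d ∈ pvDivLoop num i s ↔
      d ∈ s ∨ ∃ j, i ≤ j ∧ j * j ≤ num ∧ PySem.Int.mod num j = 0 ∧
        (d = j ∨ d = PySem.Int.floordiv num j) := by
  revert hi
  fun_induction pvDivLoop num i s with
  | case1 i s h ih =>
    intro hi
    replace ih := ih (by omega)
    simp only [dite_eq_ite] at ih
    rw [ih]
    constructor
    · rintro (hd | ⟨j, hj1, hj2, hj3, hj4⟩)
      · by_cases hm : PySem.Int.mod num i = 0
        · simp only [hm, if_true] at hd
          rcases (PySem.Set.mem_add _ _ _).1 hd with hd' | hd'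
          · rcases (PySem.Set.mem_add _ _ _).1 hd' with hd'' | hd''
            · exact Or.inl hd''
            · exact Or.inr ⟨i, le_refl i, h, hm, Or.inl hd''⟩
          · exact Or.inr ⟨i, le_refl i, h, hm, Or.inr hd'⟩
        · simp only [if_neg hm] at hd
          exact Or.inl hd
      · exact Or.inr ⟨j, by omega, hj2, hj3, hj4⟩
    · rintro (hd | ⟨j, hj1, hj2, hj3, hj4⟩)
      · left
        by_cases hm : PySem.Int.mod num i = 0
        · simp only [hm, if_true]
          exact (PySem.Set.mem_add _ _ _).2 (Or.inl ((PySem.Set.mem_add _ _ _).2 (Or.inl hd)))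
        · simpa [hm] using hd
      · by_cases hji : j = i
        · subst hji
          left
          simp only [hj3, if_true]
          rcases hj4 with h4 | h4
          · exact (PySem.Set.mem_add _ _ _).2 (Or.inl ((PySem.Set.mem_add _ _ _).2 (Or.inr h4)))
          · exact (PySem.Set.mem_add _ _ _).2 (Or.inr h4)
        · exact Or.inr ⟨j, by omega, hj2, hj3, hj4⟩
  | case2 i s h =>
    intro hi
    constructor
    · exact Or.inl
    · rintro (hd | ⟨j, hj1, hj2, hj3, hj4⟩)
      · exact hd
      · exfalso
        have hij : i * i ≤ j * j := mul_le_mul hj1 hj1 hi (le_trans hi hj1)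
        omega

-- For 3 ≤ num and 2 ≤ x < num:  num % x == 0  ↔  x is in the divisor set B builds.
lemma divset_spec (num x : Int) (h3 : 3 ≤ num) (hx1 : 2 ≤ x) (hx2 : x < num) :
    PySem.Int.mod num x = 0 ↔ x ∈ pvDivLoop num 2 PySem.Set.empty := by
  rw [mem_pvDivLoop num 2 PySem.Set.empty x (by omega)]
  constructor
  · intro hm
    right
    have hdvd : x ∣ num := (PySem.Int.mod_eq_zero_iff_dvd num x).1 hm
    by_cases hxx : x * x ≤ num
    · exact ⟨x, hx1, hxx, hm, Or.inl rfl⟩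
    · obtain ⟨c, hc⟩ := hdvd
      have hcpos : 0 < c := by nlinarith
      have hc2 : 2 ≤ c := by
        by_contra hlt
        have hc1 : c = 1 := by omega
        rw [hc1, mul_one] at hc
        omega
      have hcx : c < x := by nlinarith
      refine ⟨c, hc2, by nlinarith, ?_, Or.inr ?_⟩
      · exact (PySem.Int.mod_eq_zero_iff_dvd num c).2 ⟨x, by rw [hc]; ring⟩
      · rw [PySem.Int.floordiv_eq_ediv_of_pos (by omega)]
        rw [hc, mul_comm]
        exact (Int.mul_ediv_cancel_left x (by omega)).symm
  · rintro (hd | ⟨j, hj1, hj2, hj3, hj4⟩)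
    · simp [PySem.Set.empty] at hd
    · have hjdvd : j ∣ num := (PySem.Int.mod_eq_zero_iff_dvd num j).1 hj3
      rcases hj4 with h4 | h4
      · subst h4; exact hj3
      · obtain ⟨c, hc⟩ := hjdvd
        have hjpos : 0 < j := by omega
        have hxc : x = c := by
          rw [h4, PySem.Int.floordiv_eq_ediv_of_pos hjpos, hc,
            Int.mul_ediv_cancel_left c (by omega)]
        apply (PySem.Int.mod_eq_zero_iff_dvd num x).2
        exact ⟨j, by rw [hxc, hc, mul_comm]⟩

-- ===== VERDICT (by name: the statement is the Claim_ definition above) =====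
theorem all_num_in_fi_spec : Claim_equal_all_num_in_fi := by
  intro num _
  unfold Spec_all_num_in_fi all_num_in_fi all_num_in_fi_alt
  by_cases h : num < 3
  · rw [if_pos h, PySem.List.pyRange_one_eq_nil (by omega)]
    rfl
  · rw [if_neg h, PySem.List.foldl_append_ite_eq_filter, List.nil_append]
    apply List.filter_congr
    intro x hx
    have hb := (PySem.List.mem_pyRange_one).1 hx
    have hspec := divset_spec num x (by omega) hb.1 hb.2
    by_cases hm : PySem.Int.mod num x = 0
    · have hc : PySem.Set.contains (pvDivLoop num 2 PySem.Set.empty) x = true :=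
        (PySem.Set.contains_iff _ _).2 (hspec.1 hm)
      rw [hm, hc]
      rfl
    · have hc : PySem.Set.contains (pvDivLoop num 2 PySem.Set.empty) x = false := by
        cases hcon : PySem.Set.contains (pvDivLoop num 2 PySem.Set.empty) x
        · rfl
        · exact absurd (hspec.2 ((PySem.Set.contains_iff _ _).1 hcon)) hm
      rw [hc]
      simp [hm]
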